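-- pv_equiv track=rewrite | github.com/chenyo34/CodePractice | Tiktok/Prefix.py | getPrefixScores
-- ===== SOURCE A (Python) =====
-- def getPrefixScores(arr):
--
--     ans = []
--     for i in range(1,len(arr)+1):
--         cur_arr = []
--         temp = arr[:i]
--         cur = max(temp)
--         for n in temp:
--             n += cur
--             cur_arr.append(n)
--             cur = n
--         ans.append(sum(cur_arr) % (10**9+7))
--     return ans
-- ===== SOURCE B (Python) =====
-- def getPrefixScores(arr):
--     MOD = 10**9 + 7
--     ans = []
--     m = None  # running max of the prefix
--     s = 0     # prefix sum
--     c = 0     # cumulative sum of prefix sums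
--     i = 0
--     for x in arr:
--         i += 1
--         m = x if m is None or x > m else m
--         s += x
--         c += s
--         ans.append((i * m + c) % MOD)
--     return ans
-- ===== Notes on version B (the rewrite author's own statement) =====
-- stated objective: faster
-- what changed: Replaced the per-prefix recomputation (slice, max, inner cumulative loop, sum) by a single pass maintaining the running max, the prefix sum and the cumulative sum of prefix sums, so each prefix score is i*max + cumsum in O(1).
import Mathlib
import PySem

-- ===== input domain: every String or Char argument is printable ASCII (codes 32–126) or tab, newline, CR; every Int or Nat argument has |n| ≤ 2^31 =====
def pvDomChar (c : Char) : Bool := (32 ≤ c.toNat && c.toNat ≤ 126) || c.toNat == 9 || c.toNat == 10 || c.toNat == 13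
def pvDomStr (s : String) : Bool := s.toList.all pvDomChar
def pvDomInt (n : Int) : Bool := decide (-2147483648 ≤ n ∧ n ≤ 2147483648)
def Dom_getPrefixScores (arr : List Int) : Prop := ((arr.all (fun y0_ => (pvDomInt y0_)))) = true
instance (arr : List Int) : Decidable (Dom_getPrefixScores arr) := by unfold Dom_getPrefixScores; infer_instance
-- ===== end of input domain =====

-- B replaces A's per-prefix recomputation (slice, max, inner cumulative loop, sum) by
-- one pass keeping the running max, prefix sum and cumulative sum of prefix sums: O(n) vs O(n^2).

-- ===== PORT A =====
def getPrefixScores (arr : List Int) : List Int :=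
  (PySem.List.pyRange 1 ((arr.length : Int) + 1) 1).foldl
    (fun ans i =>
      let temp := PySem.List.slice arr none (some i)
      -- max(temp): temp is nonempty for every i in range(1, len+1), so max never raises;
      -- .getD 0 is an unreachable default.
      let cur := (PySem.List.max? temp (fun x => x)).getD 0
      let p := temp.foldl
        (fun (st : List Int × Int) n =>
          let n' := n + st.2
          (st.1 ++ [n'], n')) ([], cur)
      ans ++ [PySem.Int.mod p.1.sum (10 ^ 9 + 7)])
    []

-- ===== PORT B =====
def getPrefixScores_alt (arr : List Int) : List Int :=
  (arr.foldl
    (fun (st : Int × Option Int × Int × Int × List Int) x =>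
      let i := st.1 + 1
      let m : Option Int :=
        match st.2.1 with
        | none => some x
        | some mv => if mv < x then some x else some mv
      let s := st.2.2.1 + x
      let c := st.2.2.2.1 + s
      (i, m, s, c, st.2.2.2.2 ++ [PySem.Int.mod (i * m.getD 0 + c) (10 ^ 9 + 7)]))
    (0, none, 0, 0, [])).2.2.2.2

-- ===== PRECONDITION & SPEC =====
def Spec_getPrefixScores (arr : List Int) (out : List Int) : Prop := out = getPrefixScores_alt arr
instance (arr : List Int) (out : List Int) : Decidable (Spec_getPrefixScores arr out) := by unfold Spec_getPrefixScores; infer_instance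

-- ===== CLAIM (what is proved, stated in full; the proofs are below) =====
def Claim_equal_getPrefixScores : Prop := ∀ (arr : List Int), Dom_getPrefixScores arr → Spec_getPrefixScores arr (getPrefixScores arr)

-- ===== LEMMAS AND PROOFS =====

-- running max of a list as A's/B's loops maintain it
def pvOM (l : List Int) : Option Int :=
  l.foldl (fun m x =>
    match m with
    | none => some x
    | some mv => if mv < x then some x else some mv) none

-- sum of all prefix sums of l (CSr (t) = Σ_{j=1..|t|} sum(t[:j]))
def pvCS : List Int → Int
  | [] => 0
  | n :: rest => ((rest.length : Int) + 1) * n + pvCS rest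

-- the score both programs produce for the prefix p ++ [x]
def pvOut (p : List Int) (x : Int) : Int :=
  PySem.Int.mod (((p.length : Int) + 1) * (pvOM (p ++ [x])).getD 0 + (pvCS p + p.sum + x)) (10 ^ 9 + 7)

lemma pvOM_append (p : List Int) (x : Int) :
    pvOM (p ++ [x]) =
      match pvOM p with
      | none => some x
      | some mv => if mv < x then some x else some mv := by
  simp [pvOM, List.foldl_append]

lemma pvMax_eq_pvOM (l : List Int) : PySem.List.max? l (fun x => x) = pvOM l := by
  unfold PySem.List.max? pvOM
  congr 1
  funext m x
  cases m <;> rfl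

lemma pvCS_append (p : List Int) (x : Int) :
    pvCS (p ++ [x]) = pvCS p + p.sum + x := by
  induction p with
  | nil => simp [pvCS]
  | cons n rest ih => simp [pvCS, ih]; ring

lemma pvInnerSum (t : List Int) (acc : List Int) (c0 : Int) :
    ((t.foldl (fun (st : List Int × Int) n => (st.1 ++ [n + st.2], n + st.2)) (acc, c0)).1).sum
      = acc.sum + (t.length : Int) * c0 + pvCS t := by
  induction t generalizing acc c0 with
  | nil => simp [pvCS]
  | cons n rest ih =>
      simp only [List.foldl_cons, ih, List.sum_append, List.sum_cons, List.sum_nil,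
        List.length_cons, pvCS]
      push_cast
      ring

lemma pvA_append (p : List Int) (x : Int) :
    getPrefixScores (p ++ [x]) = getPrefixScores p ++ [pvOut p x] := by
  unfold getPrefixScores
  have hlen : ((p ++ [x]).length : Int) + 1 = (((p.length : Int) + 1) + 1) := by
    simp
  rw [hlen, PySem.List.pyRange_one_succ_right (by omega), List.foldl_append]
  have hcongr :
      (PySem.List.pyRange 1 ((p.length : Int) + 1)).foldl
        (fun ans i =>
          let temp := PySem.List.slice (p ++ [x]) none (some i)
          let cur := (PySem.List.max? temp (fun x => x)).getD 0
          let q := temp.foldl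
            (fun (st : List Int × Int) n => (st.1 ++ [n + st.2], n + st.2)) ([], cur)
          ans ++ [PySem.Int.mod q.1.sum (10 ^ 9 + 7)]) []
      = (PySem.List.pyRange 1 ((p.length : Int) + 1)).foldl
        (fun ans i =>
          let temp := PySem.List.slice p none (some i)
          let cur := (PySem.List.max? temp (fun x => x)).getD 0
          let q := temp.foldl
            (fun (st : List Int × Int) n => (st.1 ++ [n + st.2], n + st.2)) ([], cur)
          ans ++ [PySem.Int.mod q.1.sum (10 ^ 9 + 7)]) [] := by
    apply PySem.List.foldl_congr_mem
    intro acc i hi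
    rcases PySem.List.mem_pyRange_one.mp hi with ⟨h1, h2⟩
    have hi0 : 0 ≤ i := by omega
    have hslice : PySem.List.slice (p ++ [x]) none (some i) = PySem.List.slice p none (some i) := by
      rw [PySem.List.slice_to (p ++ [x]) hi0, PySem.List.slice_to p hi0,
        List.take_append_of_le_length (by omega)]
    simp only [hslice]
  rw [hcongr]
  -- last iteration: temp is the whole list p ++ [x]
  have hfull : PySem.List.slice (p ++ [x]) none (some ((p.length : Int) + 1)) = p ++ [x] := by
    have : ((p.length : Int) + 1) = ((p.length + 1 : Nat) : Int) := by push_cast; ring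
    rw [this, PySem.List.slice_to_natCast]
    exact List.take_of_length_le (by simp)
  simp only [hfull, List.foldl_cons, List.foldl_nil, pvMax_eq_pvOM]
  have hval : PySem.Int.mod
      (((p ++ [x]).foldl (fun (st : List Int × Int) n => (st.1 ++ [n + st.2], n + st.2))
        ([], (pvOM (p ++ [x])).getD 0)).1.sum) (10 ^ 9 + 7) = pvOut p x := by
    rw [pvInnerSum, pvCS_append]
    unfold pvOut
    congr 1
    simp only [List.sum_nil, List.length_append, List.length_cons, List.length_nil]
    push_cast
    ring
  rw [hval]

lemma pvB_state (p : List Int) :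
    p.foldl
      (fun (st : Int × Option Int × Int × Int × List Int) x =>
        let i := st.1 + 1
        let m : Option Int :=
          match st.2.1 with
          | none => some x
          | some mv => if mv < x then some x else some mv
        let s := st.2.2.1 + x
        let c := st.2.2.2.1 + s
        (i, m, s, c, st.2.2.2.2 ++ [PySem.Int.mod (i * m.getD 0 + c) (10 ^ 9 + 7)]))
      (0, none, 0, 0, [])
    = ((p.length : Int), pvOM p, p.sum, pvCS p, getPrefixScores_alt p) := by
  induction p using List.reverseRecOn with
  | nil => simp [pvOM, pvCS, getPrefixScores_alt]
  | append_singleton p x ih =>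
      rw [List.foldl_append, ih]
      simp only [List.foldl_cons, List.foldl_nil]
      have h5 : getPrefixScores_alt (p ++ [x])
          = ((p ++ [x]).foldl
              (fun (st : Int × Option Int × Int × Int × List Int) x =>
                let i := st.1 + 1
                let m : Option Int :=
                  match st.2.1 with
                  | none => some x
                  | some mv => if mv < x then some x else some mv
                let s := st.2.2.1 + x
                let c := st.2.2.2.1 + s
                (i, m, s, c, st.2.2.2.2 ++ [PySem.Int.mod (i * m.getD 0 + c) (10 ^ 9 + 7)]))
              (0, none, 0, 0, [])).2.2.2.2 := rfl
    -- recompute the last step on the right-hand side as well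
      rw [h5, List.foldl_append, ih]
      simp only [List.foldl_cons, List.foldl_nil]
      refine Prod.ext ?_ (Prod.ext ?_ (Prod.ext ?_ (Prod.ext ?_ ?_)))
      · simp
      · simp [pvOM_append]
      · simp [List.sum_append]
      · simp [pvCS_append]; ring
      · rfl

lemma pvB_append (p : List Int) (x : Int) :
    getPrefixScores_alt (p ++ [x]) = getPrefixScores_alt p ++ [pvOut p x] := by
  show ((p ++ [x]).foldl _ (0, none, 0, 0, [])).2.2.2.2 = _
  rw [List.foldl_append, pvB_state p]
  simp only [List.foldl_cons, List.foldl_nil]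
  unfold pvOut
  rw [pvOM_append]
  rcases h : pvOM p with _ | mv <;> simp <;> ring_nf

lemma pvMain (arr : List Int) : getPrefixScores arr = getPrefixScores_alt arr := by
  induction arr using List.reverseRecOn with
  | nil => rfl
  | append_singleton p x ih => rw [pvA_append, pvB_append, ih]

-- ===== VERDICT (by name: the statement is the Claim_ definition above) =====
theorem getPrefixScores_spec : Claim_equal_getPrefixScores := by
  intro arr _
  unfold Spec_getPrefixScores
  exact pvMain arr
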